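-- pv_equiv track=rewrite | github.com/seamile/ImgSearch | src/imgsearch/utils.py | multi_remove
-- ===== SOURCE A (Python) =====
-- from collections.abc import Hashable, Sequence
-- from typing import TypeVar
--
-- HashableT = TypeVar('HashableT', bound=Hashable)
--
-- def multi_remove(lst: list[HashableT], values: list[HashableT]) -> list[int]:
--     """Remove multiple values from a list"""
--     value_set = set(values)
--     removed_indices, kept = [], []
--     for i, v in enumerate(lst):
--         if v in value_set:
--             removed_indices.append(i)
--         else:
--             kept.append(v)
--     lst[:] = kept  # In-place modification
--     return removed_indices
-- ===== SOURCE B (Python) =====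
-- def multi_remove(lst, values):
--     """Remove multiple values from a list"""
--     value_set = set(values)
--     removed = [i for i, v in enumerate(lst) if v in value_set]
--     for i in reversed(removed):
--         del lst[i]
--     return removed
-- ===== Notes on version B (the rewrite author's own statement) =====
-- stated objective: alternative
-- what changed: B computes the removed indices with a single comprehension and then mutates the list in place by reverse-order deletion, instead of A's one fold that builds both an index list and a fresh kept-list and reassigns lst[:]; same in-place mutation of lst, return value proved equal.
import Mathlib
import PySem

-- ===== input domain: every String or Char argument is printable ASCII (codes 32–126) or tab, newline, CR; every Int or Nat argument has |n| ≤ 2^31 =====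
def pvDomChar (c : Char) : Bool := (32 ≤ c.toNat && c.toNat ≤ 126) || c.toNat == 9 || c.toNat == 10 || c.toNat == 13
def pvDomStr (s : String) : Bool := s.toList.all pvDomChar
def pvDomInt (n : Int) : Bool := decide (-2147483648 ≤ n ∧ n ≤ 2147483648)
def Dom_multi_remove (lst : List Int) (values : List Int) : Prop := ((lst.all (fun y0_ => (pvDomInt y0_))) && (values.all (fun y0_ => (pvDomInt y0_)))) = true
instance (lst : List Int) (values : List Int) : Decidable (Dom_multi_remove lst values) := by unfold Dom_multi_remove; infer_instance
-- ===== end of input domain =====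

-- B builds the removed-index list with one comprehension and deletes in place in reverse
-- order, instead of A's fold that also maintains a kept-list; return values proved equal.
-- Both A and B mutate lst in place (the same final list); the equivalence proved here is
-- about the RETURN value (the removed indices) only.

-- ===== PORT A =====
def multi_remove (lst : List Int) (values : List Int) : List Int :=
  let value_set := PySem.Set.ofList values
  let st := (PySem.List.enumerate lst).foldl
    (fun (st : List Int × List Int) iv =>
      if value_set.contains iv.2 then (st.1 ++ [iv.1], st.2)
      else (st.1, st.2 ++ [iv.2]))
    ([], [])
  -- lst[:] = kept is the in-place mutation; not observable in the return value
  st.1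

-- ===== PORT B =====
def multi_remove_alt (lst : List Int) (values : List Int) : List Int :=
  let value_set := PySem.Set.ofList values
  -- removed = [i for i, v in enumerate(lst) if v in value_set]
  ((PySem.List.enumerate lst).filter (fun iv => value_set.contains iv.2)).map (fun iv => iv.1)
  -- the reverse-order deletions mutate lst only; the return value is 'removed'

-- ===== PRECONDITION & SPEC =====
def Spec_multi_remove (lst : List Int) (values : List Int) (out : List Int) : Prop := out = multi_remove_alt lst values
instance (lst : List Int) (values : List Int) (out : List Int) : Decidable (Spec_multi_remove lst values out) := by unfold Spec_multi_remove; infer_instance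

-- ===== CLAIM (what is proved, stated in full; the proofs are below) =====
def Claim_equal_multi_remove : Prop := ∀ (lst : List Int) (values : List Int), Dom_multi_remove lst values → Spec_multi_remove lst values (multi_remove lst values)

-- ===== LEMMAS AND PROOFS =====
theorem multi_remove_fold_fst (vs : PySem.Set Int) (e : List (Int × Int)) (r k : List Int) :
    (e.foldl (fun (st : List Int × List Int) iv =>
        if vs.contains iv.2 then (st.1 ++ [iv.1], st.2)
        else (st.1, st.2 ++ [iv.2])) (r, k)).1
      = r ++ (e.filter (fun iv => vs.contains iv.2)).map (fun iv => iv.1) := by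
  induction e generalizing r k with
  | nil => simp
  | cons p t ih =>
    rw [List.foldl_cons, List.filter_cons]
    by_cases h : vs.contains p.2
    · have h' : p.2 ∈ vs := by simpa using h
      rw [if_pos h, ih]; simp [h']
    · have h' : p.2 ∉ vs := by simpa using h
      rw [if_neg h, ih]; simp [h']

-- ===== VERDICT (by name: the statement is the Claim_ definition above) =====
theorem multi_remove_spec : Claim_equal_multi_remove := by
  intro lst values _
  unfold Spec_multi_remove multi_remove multi_remove_alt
  simpa using multi_remove_fold_fst (PySem.Set.ofList values) (PySem.List.enumerate lst) [] []
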